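-- pv_equiv track=rewrite | github.com/LongenesisLtd/mathjson-solver | src/mathjson_solver/__main__.py | _CumulativeProduct
-- ===== SOURCE A (Python) =====
-- from functools import reduce
--
-- def _CumulativeProduct(l: list) -> list:
--     res = []
--     for i, x in enumerate(l):
--         if i == 0:
--             res.append(x)
--         else:
--             res.append(reduce(lambda a, b: a * b, l[: i + 1]))
--     return res
-- ===== SOURCE B (Python) =====
-- def _CumulativeProduct(l: list) -> list:
--     res = []
--     p = 1
--     for x in l:
--         p = p * x
--         res.append(p)
--     return res
-- ===== Notes on version B (the rewrite author's own statement) =====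
-- stated objective: faster
-- what changed: Replaces the per-index reduce over the growing prefix l[:i+1] with a single running-product accumulator in one pass.
import Mathlib
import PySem

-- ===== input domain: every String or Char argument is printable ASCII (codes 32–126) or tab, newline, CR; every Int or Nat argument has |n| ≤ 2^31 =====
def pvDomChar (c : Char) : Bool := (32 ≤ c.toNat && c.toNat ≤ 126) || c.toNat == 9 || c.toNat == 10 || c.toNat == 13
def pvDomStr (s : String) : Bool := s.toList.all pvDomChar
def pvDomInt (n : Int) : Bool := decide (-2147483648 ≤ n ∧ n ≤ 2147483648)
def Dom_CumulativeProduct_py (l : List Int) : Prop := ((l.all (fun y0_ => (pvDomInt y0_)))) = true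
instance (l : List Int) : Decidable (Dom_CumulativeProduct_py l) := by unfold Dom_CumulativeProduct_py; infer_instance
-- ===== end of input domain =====

-- B replaces A's per-index reduce over the prefix l[:i+1] with a single running-product pass (objective: faster).


-- ===== PORT A =====
-- reduce(lambda a, b: a * b, xs); [] is unreachable in A (the else branch has i ≥ 1, so the slice is nonempty)
def pyReduceMul : List Int → Int
  | [] => 0
  | h :: t => t.foldl (· * ·) h

def CumulativeProduct_py (l : List Int) : List Int :=
  (PySem.List.enumerate l).foldl
    (fun res ix =>
      if ix.1 == 0 then res ++ [ix.2]
      else res ++ [pyReduceMul (PySem.List.slice l none (some (ix.1 + 1)))])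
    []

-- ===== PORT B =====
def CumulativeProduct_py_alt (l : List Int) : List Int :=
  (l.foldl (fun acc x => (acc.1 * x, acc.2 ++ [acc.1 * x])) ((1 : Int), ([] : List Int))).2

-- ===== PRECONDITION & SPEC =====
def Spec_CumulativeProduct_py (l : List Int) (out : List Int) : Prop := out = CumulativeProduct_py_alt l
instance (l : List Int) (out : List Int) : Decidable (Spec_CumulativeProduct_py l out) := by unfold Spec_CumulativeProduct_py; infer_instance

-- ===== CLAIM (what is proved, stated in full; the proofs are below) =====
def Claim_equal_CumulativeProduct_py : Prop := ∀ (l : List Int), Dom_CumulativeProduct_py l → Spec_CumulativeProduct_py l (CumulativeProduct_py l)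

-- ===== LEMMAS AND PROOFS =====

-- reference scan: the cumulative products of l starting from running product p
def scanMul (p : Int) : List Int → List Int
  | [] => []
  | x :: t => (p * x) :: scanMul (p * x) t

theorem foldl_mul_eq (t : List Int) (h : Int) : t.foldl (· * ·) h = h * t.prod := by
  induction t generalizing h with
  | nil => simp
  | cons y t ih => simp [List.foldl_cons, ih, List.prod_cons, mul_assoc]

theorem pyReduceMul_append (pre : List Int) (x : Int) (hne : pre ≠ []) :
    pyReduceMul (pre ++ [x]) = pre.prod * x := by
  cases pre with
  | nil => exact absurd rfl hne
  | cons h t =>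
    simp [pyReduceMul, foldl_mul_eq, List.prod_cons, mul_assoc]

-- B's fold computes res ++ scanMul p l
theorem alt_fold (l : List Int) (p : Int) (res : List Int) :
    (l.foldl (fun acc x => (acc.1 * x, acc.2 ++ [acc.1 * x])) (p, res)).2
      = res ++ scanMul p l := by
  induction l generalizing p res with
  | nil => simp [scanMul]
  | cons x t ih => simp [List.foldl_cons, ih, scanMul]

-- A's per-element value, as a function of the (index, element) pair
def aElem (L : List Int) (ix : Int × Int) : Int :=
  if ix.1 == 0 then ix.2 else pyReduceMul (PySem.List.slice L none (some (ix.1 + 1)))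

theorem a_fold_map (L : List Int) (s : List (Int × Int)) (res : List Int) :
    (s.foldl (fun res ix =>
        if ix.1 == 0 then res ++ [ix.2]
        else res ++ [pyReduceMul (PySem.List.slice L none (some (ix.1 + 1)))]) res)
      = res ++ s.map (aElem L) := by
  have : (fun (res : List Int) (ix : Int × Int) =>
      if ix.1 == 0 then res ++ [ix.2]
      else res ++ [pyReduceMul (PySem.List.slice L none (some (ix.1 + 1)))])
      = fun res ix => res ++ [aElem L ix] := by
    funext r ix; unfold aElem; split <;> rfl
  rw [this, PySem.List.foldl_append_singleton_eq_map]

theorem enum_map_scan (s : List Int) (pre : List Int) :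
    (PySem.List.enumerate s (pre.length : Int)).map (aElem (pre ++ s)) = scanMul pre.prod s := by
  induction s generalizing pre with
  | nil => simp [PySem.List.enumerate, scanMul]
  | cons x t ih =>
    simp only [PySem.List.enumerate, List.map_cons, scanMul]
    congr 1
    · -- head: aElem (pre ++ x :: t) (pre.length, x) = pre.prod * x
      cases pre with
      | nil => simp [aElem]
      | cons h p =>
        have h0 : ¬ ((((h :: p : List Int)).length : Int) == 0) = true := by
          simp; omega
        have hcast : (((h :: p : List Int).length : Int) + 1) = (((h :: p).length + 1 : Nat) : Int) := by
          push_cast; ring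
        have hslice : PySem.List.slice ((h :: p) ++ x :: t) none (some (((h :: p : List Int).length : Int) + 1))
            = (h :: p) ++ [x] := by
          rw [hcast, PySem.List.slice_to_natCast, List.take_append]
          simp
        unfold aElem
        rw [if_neg h0, hslice, pyReduceMul_append _ _ (by simp)]
    · -- tail: instantiate the IH at pre ++ [x]
      have htail := ih (pre ++ [x])
      have e1 : (((pre ++ [x]).length : Nat) : Int) = (pre.length : Int) + 1 := by
        simp
      rw [e1, List.append_assoc, List.singleton_append, List.prod_append,
        List.prod_singleton] at htail
      exact htail

-- ===== VERDICT (by name: the statement is the Claim_ definition above) =====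
theorem CumulativeProduct_py_spec : Claim_equal_CumulativeProduct_py := by
  intro l _
  unfold Spec_CumulativeProduct_py CumulativeProduct_py CumulativeProduct_py_alt
  rw [a_fold_map, alt_fold]
  have := enum_map_scan l []
  simpa [PySem.List.enumerate] using this
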